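-- pv_equiv track=rewrite | github.com/HivaMohammadzadeh1/SelfEvolveAgent-Reasoningbank-code | src/swebench_evaluator.py | _normalize_patch
-- ===== SOURCE A (Python) =====
-- def _normalize_patch(patch: str) -> str:
--     """Normalize patch for comparison by removing formatting differences."""
--     if not patch:
--         return ""
--
--     lines = []
--     for line in patch.split('\n'):
--         # Skip index lines
--         if line.startswith('index '):
--             continue
--         # Skip empty lines at start/end
--         stripped = line.rstrip()
--         if stripped or lines:  # Keep internal empty lines
--             lines.append(stripped)
--
--     # Remove trailing empty lines
--     while lines and not lines[-1]:
--         lines.pop()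
--
--     return '\n'.join(lines)
-- ===== SOURCE B (Python) =====
-- def _normalize_patch(patch: str) -> str:
--     """Normalize patch for comparison by removing formatting differences."""
--     if not patch:
--         return ""
--     lines = [l.rstrip() for l in patch.split('\n') if not l.startswith('index ')]
--     start, stop = 0, len(lines)
--     while start < stop and not lines[start]:
--         start += 1
--     while start < stop and not lines[stop - 1]:
--         stop -= 1
--     return '\n'.join(lines[start:stop])
-- ===== Notes on version B (the rewrite author's own statement) =====
-- stated objective: simpler
-- what changed: B builds the filtered+rstripped line list in one comprehension and then trims blank lines symmetrically with two cursors, replacing A's stateful in-loop suppression of leading blanks plus a trailing pop loop.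
import Mathlib
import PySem

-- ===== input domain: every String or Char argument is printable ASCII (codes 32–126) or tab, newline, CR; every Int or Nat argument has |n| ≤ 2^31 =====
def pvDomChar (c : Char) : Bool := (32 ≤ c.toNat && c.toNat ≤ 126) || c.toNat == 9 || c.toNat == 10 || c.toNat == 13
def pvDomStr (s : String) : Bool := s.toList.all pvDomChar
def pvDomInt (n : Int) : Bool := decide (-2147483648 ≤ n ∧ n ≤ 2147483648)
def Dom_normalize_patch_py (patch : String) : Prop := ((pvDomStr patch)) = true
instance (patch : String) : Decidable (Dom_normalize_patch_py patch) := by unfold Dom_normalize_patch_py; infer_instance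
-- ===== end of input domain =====

-- B replaces A's stateful in-loop suppression of leading blank lines + trailing pop loop by one
-- filtered/rstripped build followed by a symmetric two-cursor trim of blank lines at both ends (objective: simpler).

-- ===== PORT A =====
-- while lines and not lines[-1]: lines.pop()
def pvPopTrailingA (lines : List String) : List String :=
  if lines ≠ [] ∧ PySem.List.pyGet? lines (-1) = some "" then pvPopTrailingA lines.dropLast else lines
termination_by lines.length
decreasing_by
  rename_i h
  have hne : lines ≠ [] := h.1
  have : 0 < lines.length := List.length_pos_iff.mpr hne
  simp only [List.length_dropLast]
  omega

def normalize_patch_py (patch : String) : String :=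
  if patch = "" then ""
  else
    let lines := ((PySem.Str.split? patch "\n").getD []).foldl
      (fun lines line =>
        if PySem.Str.startswith line "index " then lines
        else
          let stripped := PySem.Str.rstrip line
          if stripped ≠ "" ∨ lines ≠ [] then lines ++ [stripped] else lines) []
    PySem.Str.join "\n" (pvPopTrailingA lines)

-- ===== PORT B =====
-- while start < stop and not lines[start]: start += 1
def pvTrimStartB (lines : List String) (start stop : Nat) : Nat :=
  if start < stop ∧ PySem.List.pyGet? lines (start : Int) = some "" then
    pvTrimStartB lines (start + 1) stop
  else start
termination_by stop - start

-- while start < stop and not lines[stop - 1]: stop -= 1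
def pvTrimStopB (lines : List String) (start stop : Nat) : Nat :=
  if start < stop ∧ PySem.List.pyGet? lines ((stop : Int) - 1) = some "" then
    pvTrimStopB lines start (stop - 1)
  else stop
termination_by stop

def normalize_patch_py_alt (patch : String) : String :=
  if patch = "" then ""
  else
    let lines := (((PySem.Str.split? patch "\n").getD []).filter
        (fun l => !PySem.Str.startswith l "index ")).map PySem.Str.rstrip
    let start := pvTrimStartB lines 0 lines.length
    let stop := pvTrimStopB lines start lines.length
    PySem.Str.join "\n" (PySem.List.slice lines (some (start : Int)) (some (stop : Int)))

-- ===== PRECONDITION & SPEC =====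
def Spec_normalize_patch_py (patch : String) (out : String) : Prop := out = normalize_patch_py_alt patch
instance (patch : String) (out : String) : Decidable (Spec_normalize_patch_py patch out) := by unfold Spec_normalize_patch_py; infer_instance

-- ===== CLAIM (what is proved, stated in full; the proofs are below) =====
def Claim_equal_normalize_patch_py : Prop := ∀ (patch : String), Dom_normalize_patch_py patch → Spec_normalize_patch_py patch (normalize_patch_py patch)

-- ===== LEMMAS AND PROOFS =====

-- the per-line step of A's accumulation loop
def pvStepA (lines : List String) (line : String) : List String :=
  if PySem.Str.startswith line "index " then lines
  else
    let stripped := PySem.Str.rstrip line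
    if stripped ≠ "" ∨ lines ≠ [] then lines ++ [stripped] else lines

-- the filtered+rstripped line list B builds
def pvLinesB (L : List String) : List String :=
  (L.filter (fun l => !PySem.Str.startswith l "index ")).map PySem.Str.rstrip

theorem foldA_ne (L : List String) (acc : List String) (h : acc ≠ []) :
    L.foldl pvStepA acc = acc ++ pvLinesB L := by
  induction L generalizing acc with
  | nil => simp [pvLinesB]
  | cons a t ih =>
      by_cases hs : PySem.Str.startswith a "index " = true
      · simp only [List.foldl_cons, pvStepA, pvLinesB, List.filter_cons, hs,
          Bool.not_true, if_pos, if_neg, Bool.false_eq_true, ite_false, ite_true]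
        exact ih acc h
      · have hsb : PySem.Str.startswith a "index " = false := by
          simpa using hs
        have hne : acc ++ [PySem.Str.rstrip a] ≠ [] := by simp
        simp only [List.foldl_cons, pvStepA, pvLinesB, List.filter_cons, hsb,
          Bool.not_false, Bool.false_eq_true, ite_false, ite_true, List.map_cons]
        rw [if_pos (Or.inr h), ih _ hne]
        simp [pvLinesB]

theorem foldA_nil (L : List String) :
    L.foldl pvStepA [] = (pvLinesB L).dropWhile (· == "") := by
  induction L with
  | nil => simp [pvLinesB]
  | cons a t ih =>
      by_cases hs : PySem.Str.startswith a "index " = true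
      · simp only [List.foldl_cons, pvStepA, pvLinesB, List.filter_cons, hs,
          Bool.not_true, Bool.false_eq_true, ite_false, ite_true]
        exact ih
      · have hsb : PySem.Str.startswith a "index " = false := by simpa using hs
        by_cases he : PySem.Str.rstrip a = ""
        · simp only [List.foldl_cons, pvStepA, pvLinesB, List.filter_cons, hsb,
            Bool.not_false, ite_true, List.map_cons]
          rw [if_neg (by simp [he]), List.dropWhile_cons]
          simp only [he, BEq.rfl, ite_true]
          exact ih
        · have hne : ([] : List String) ++ [PySem.Str.rstrip a] ≠ [] := by simp
          simp only [List.foldl_cons, pvStepA, pvLinesB, List.filter_cons, hsb,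
            Bool.not_false, ite_true, List.map_cons]
          rw [if_pos (Or.inl he), List.dropWhile_cons]
          have : (PySem.Str.rstrip a == "") = false := by
            simpa using he
          rw [this]
          simp only [Bool.false_eq_true, ite_false]
          rw [foldA_ne t _ hne]
          simp [pvLinesB]

theorem pop_eq (xs : List String) :
    pvPopTrailingA xs = ((xs.reverse.dropWhile (· == "")).reverse) := by
  induction xs using List.reverseRecOn with
  | nil => simp [pvPopTrailingA]
  | append_singleton ys y ih =>
      rw [pvPopTrailingA]
      have hget : PySem.List.pyGet? (ys ++ [y]) (-1) = some y := by
        simp [PySem.List.pyGet?, PySem.List.pyIdx?]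
      by_cases hy : y = ""
      · simp [hget, hy, List.dropWhile_cons, ih]
      · simp [hget, hy, List.dropWhile_cons]

theorem drop_takeWhile_length (p : String → Bool) (l : List String) :
    l.drop (l.takeWhile p).length = l.dropWhile p := by
  induction l with
  | nil => simp
  | cons a t ih => by_cases h : p a <;>
      simp [List.takeWhile_cons, List.dropWhile_cons, h, ih]

theorem trimStart_eq (lines : List String) :
    ∀ (k start : Nat), lines.length - start ≤ k → start ≤ lines.length →
    pvTrimStartB lines start lines.length
      = start + ((lines.drop start).takeWhile (· == "")).length := by
  intro k
  induction k with
  | zero =>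
      intro start hk hle
      have hstart : start = lines.length := by omega
      rw [pvTrimStartB]
      simp [hstart]
  | succ k ih =>
      intro start hk hle
      rw [pvTrimStartB]
      by_cases hlt : start < lines.length
      · have hdrop : lines.drop start = lines[start] :: lines.drop (start + 1) :=
          List.drop_eq_getElem_cons hlt
        by_cases he : lines[start] = ""
        · have hcond : start < lines.length ∧
              PySem.List.pyGet? lines (start : Int) = some "" := by
            refine ⟨hlt, ?_⟩
            simp [PySem.List.pyGet?_natCast, List.getElem?_eq_getElem hlt, he]
          rw [if_pos hcond, ih (start + 1) (by omega) (by omega), hdrop]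
          simp [List.takeWhile_cons, he]
          omega
        · have hcond : ¬ (start < lines.length ∧
              PySem.List.pyGet? lines (start : Int) = some "") := by
            simp [PySem.List.pyGet?_natCast, List.getElem?_eq_getElem hlt]
            intro _; exact he
          rw [if_neg hcond, hdrop]
          simp [List.takeWhile_cons, he]
      · have hstart : start = lines.length := by omega
        rw [if_neg (by simp [hlt])]
        simp [hstart]

theorem trimStop_eq (lines : List String) :
    ∀ (k start stop : Nat), stop ≤ k → start ≤ stop → stop ≤ lines.length →
    pvTrimStopB lines start stop
      = start + (((lines.drop start).take (stop - start)).reverse.dropWhile (· == "")).length := by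
  intro k
  induction k with
  | zero =>
      intro start stop hk h1 h2
      have h0 : stop = 0 := by omega
      have hs0 : start = 0 := by omega
      rw [pvTrimStopB]
      simp [h0, hs0]
  | succ k ih =>
      intro start stop hk h1 h2
      rw [pvTrimStopB]
      by_cases hlt : start < stop
      · have hidx : stop - 1 < lines.length := by omega
        have hgi : PySem.List.pyGet? lines ((stop : Int) - 1) = some lines[stop - 1] := by
          have : ((stop : Int) - 1) = ((stop - 1 : Nat) : Int) := by omega
          rw [this]
          simp [PySem.List.pyGet?_natCast, List.getElem?_eq_getElem hidx]
        have hseg : (lines.drop start).take (stop - start)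
            = (lines.drop start).take (stop - 1 - start) ++ [lines[stop - 1]] := by
          have hn : stop - start = (stop - 1 - start) + 1 := by omega
          rw [hn, List.take_add_one]
          have hlen : stop - 1 - start < (lines.drop start).length := by
            simp [List.length_drop]; omega
          rw [List.getElem?_eq_getElem hlen]
          simp [List.getElem_drop]
          congr 2
          omega
        by_cases he : lines[stop - 1] = ""
        · have hcond : start < stop ∧
              PySem.List.pyGet? lines ((stop : Int) - 1) = some "" := ⟨hlt, by rw [hgi, he]⟩
          rw [if_pos hcond, ih start (stop - 1) (by omega) (by omega) (by omega), hseg]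
          simp [List.dropWhile_cons, he]
        · have hcond : ¬ (start < stop ∧
              PySem.List.pyGet? lines ((stop : Int) - 1) = some "") := by
            rw [hgi]; simp; intro _ hc; exact he hc
          rw [if_neg hcond, hseg]
          have hlen2 : ((lines.drop start).take (stop - 1 - start)).length
              = stop - 1 - start := by
            simp [List.length_take, List.length_drop]; omega
          simp [List.dropWhile_cons, he, hlen2]
          omega
      · have h0 : start = stop := by omega
        rw [if_neg (by simp [hlt])]
        simp [h0]

theorem trimmed_take (D : List String) :
    D.take ((D.reverse.dropWhile (· == "")).length)
      = (D.reverse.dropWhile (· == "")).reverse := by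
  have hsuf : (D.reverse.dropWhile (· == "")) <:+ D.reverse :=
    List.dropWhile_suffix _
  have hpre : (D.reverse.dropWhile (· == "")).reverse <+: D := by
    simpa using List.reverse_prefix.mpr hsuf
  have h := List.prefix_iff_eq_take.mp hpre
  rw [List.length_reverse] at h
  exact h.symm

theorem main_eq (patch : String) :
    normalize_patch_py patch = normalize_patch_py_alt patch := by
  unfold normalize_patch_py normalize_patch_py_alt
  by_cases h0 : patch = ""
  · simp [h0]
  · rw [if_neg h0, if_neg h0]
    dsimp only
    set L := (PySem.Str.split? patch "\n").getD [] with hL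
    have hfold : L.foldl (fun lines line =>
        if PySem.Str.startswith line "index " then lines
        else
          let stripped := PySem.Str.rstrip line
          if stripped ≠ "" ∨ lines ≠ [] then lines ++ [stripped] else lines) []
        = (pvLinesB L).dropWhile (· == "") := foldA_nil L
    rw [hfold]
    set F := pvLinesB L with hF
    have hFline : ((L.filter (fun l => !PySem.Str.startswith l "index ")).map PySem.Str.rstrip) = F := rfl
    rw [hFline]
    set D := F.dropWhile (· == "") with hD
    -- start cursor
    have hstart : pvTrimStartB F 0 F.length = (F.takeWhile (· == "")).length := by
      have := trimStart_eq F F.length 0 (by omega) (by omega)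
      simpa using this
    rw [hstart]
    have hdropD : F.drop (F.takeWhile (· == "")).length = D :=
      drop_takeWhile_length _ F
    have hstartle : (F.takeWhile (· == "")).length ≤ F.length :=
      (List.takeWhile_prefix _).length_le
    -- stop cursor
    have hstop := trimStop_eq F F.length (F.takeWhile (· == "")).length F.length
      (by omega) hstartle (by omega)
    have hsegD : (F.drop (F.takeWhile (· == "")).length).take
        (F.length - (F.takeWhile (· == "")).length) = D := by
      rw [hdropD]
      apply List.take_of_length_le
      have : D.length ≤ F.length - (F.takeWhile (· == "")).length := by
        rw [← hdropD]
        simp [List.length_drop]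
      exact this
    rw [hsegD] at hstop
    rw [hstop]
    -- the slice
    have hslice : PySem.List.slice F
        (some (((F.takeWhile (· == "")).length : Nat) : Int))
        (some ((((F.takeWhile (· == "")).length + (D.reverse.dropWhile (· == "")).length : Nat)) : Int))
        = (F.drop (F.takeWhile (· == "")).length).take
            ((F.takeWhile (· == "")).length + (D.reverse.dropWhile (· == "")).length
              - (F.takeWhile (· == "")).length) := by
      exact PySem.List.slice_natCast F _ _
    rw [hslice, hdropD]
    have harith : (F.takeWhile (· == "")).length + (D.reverse.dropWhile (· == "")).length
        - (F.takeWhile (· == "")).length = (D.reverse.dropWhile (· == "")).length := by omega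
    rw [harith, trimmed_take, pop_eq]

-- ===== VERDICT (by name: the statement is the Claim_ definition above) =====
theorem normalize_patch_py_spec : Claim_equal_normalize_patch_py := by
  intro patch _
  unfold Spec_normalize_patch_py
  exact main_eq patch
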